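-- pv_equiv track=rewrite | github.com/mabxxyun/social-media-analytics | hw1/hw1.py | node_list_gen
-- ===== SOURCE A (Python) =====
-- def node_list_gen(data, data1):
--     nodes ={}
--     for i in range(len(data)):
--         nodes[data[i][0]] = 1
--         nodes[data[i][1]] = 1
--     for i in range(len(data1)):
--         nodes[data1[i][0]] = 1
--         nodes[data1[i][1]] = 1
--     node_list = []
--     for i in nodes:
--         node_list.append(i)
--     node_list = sorted(node_list)
--     return node_list
-- ===== SOURCE B (Python) =====
-- def node_list_gen(data, data1):
--     all_nodes = []
--     for a, b in data:
--         all_nodes.append(a)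
--         all_nodes.append(b)
--     for a, b in data1:
--         all_nodes.append(a)
--         all_nodes.append(b)
--     all_nodes = sorted(all_nodes)
--     node_list = []
--     for x in all_nodes:
--         if not node_list or x != node_list[-1]:
--             node_list.append(x)
--     return node_list
-- ===== Notes on version B (the rewrite author's own statement) =====
-- stated objective: alternative
-- what changed: Replaces the dict-based dedup-then-sort (index loops writing keys into a dict, then sorting its keys) by sort-then-adjacent-dedup: flatten both edge lists into one list of endpoints, sort it, and keep each element only when it differs from the previously kept one.
import Mathlib
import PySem

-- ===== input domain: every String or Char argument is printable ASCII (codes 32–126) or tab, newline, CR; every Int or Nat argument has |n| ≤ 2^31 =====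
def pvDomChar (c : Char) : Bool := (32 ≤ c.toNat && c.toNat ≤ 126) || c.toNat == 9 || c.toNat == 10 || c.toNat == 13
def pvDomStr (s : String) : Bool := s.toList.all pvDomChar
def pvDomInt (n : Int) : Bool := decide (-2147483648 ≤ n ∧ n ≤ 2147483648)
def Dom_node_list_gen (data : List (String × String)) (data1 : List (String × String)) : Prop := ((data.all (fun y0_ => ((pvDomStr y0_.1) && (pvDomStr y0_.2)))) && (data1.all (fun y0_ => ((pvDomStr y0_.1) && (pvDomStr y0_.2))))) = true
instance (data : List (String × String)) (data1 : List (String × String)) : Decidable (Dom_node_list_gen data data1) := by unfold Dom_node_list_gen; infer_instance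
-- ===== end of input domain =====

-- B replaces A's dict-dedup-then-sort by flatten, sort, and one adjacent-dedup scan (alternative algorithm, same cost).


-- ===== PORT A =====
def node_list_gen (data : List (String × String)) (data1 : List (String × String)) : List String :=
  let nodes : PySem.Dict String Int :=
    (PySem.List.pyRange 0 (data.length : Int) 1).foldl
      (fun d i =>
        (d.insert (PySem.List.pyGetD data i ("", "")).1 1).insert (PySem.List.pyGetD data i ("", "")).2 1)
      PySem.Dict.empty
  let nodes :=
    (PySem.List.pyRange 0 (data1.length : Int) 1).foldl
      (fun d i =>
        (d.insert (PySem.List.pyGetD data1 i ("", "")).1 1).insert (PySem.List.pyGetD data1 i ("", "")).2 1)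
      nodes
  let node_list := nodes.keys.foldl (fun acc k => acc ++ [k]) []
  PySem.List.sorted node_list (fun x => x) false

-- ===== PORT B =====
def node_list_gen_alt (data : List (String × String)) (data1 : List (String × String)) : List String :=
  let all_nodes := data.foldl (fun acc p => acc ++ [p.1, p.2]) []
  let all_nodes := data1.foldl (fun acc p => acc ++ [p.1, p.2]) all_nodes
  let all_nodes := PySem.List.sorted all_nodes (fun x => x) false
  all_nodes.foldl
    (fun node_list x =>
      if node_list = [] ∨ node_list.getLast? ≠ some x then node_list ++ [x] else node_list)
    []

-- ===== PRECONDITION & SPEC =====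
def Spec_node_list_gen (data : List (String × String)) (data1 : List (String × String)) (out : List String) : Prop := out = node_list_gen_alt data data1
instance (data : List (String × String)) (data1 : List (String × String)) (out : List String) : Decidable (Spec_node_list_gen data data1 out) := by unfold Spec_node_list_gen; infer_instance

-- ===== CLAIM (what is proved, stated in full; the proofs are below) =====
def Claim_equal_node_list_gen : Prop := ∀ (data : List (String × String)) (data1 : List (String × String)), Dom_node_list_gen data data1 → Spec_node_list_gen data data1 (node_list_gen data data1)

-- ===== LEMMAS AND PROOFS =====

-- inserting any value under key k adds k to the key set
theorem keys_insert_one (d : PySem.Dict String Int) (k : String) :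
    (d.insert k 1).keys = PySem.Set.add d.keys k := by
  by_cases h : d.contains k = true
  · rw [PySem.Dict.keys_insert_of_contains _ _ h]
    simp [PySem.Set.add, PySem.Set.contains, (PySem.Dict.contains_iff_mem_keys _ _).mp h]
  · rw [PySem.Dict.keys_insert_of_not_contains _ _ (by simpa using h)]
    simp [PySem.Set.add, PySem.Set.contains]
    intro hm
    exact absurd ((PySem.Dict.contains_iff_mem_keys _ _).mpr hm) h

-- keys of A's double-insert loop: the first occurrences of the flattened endpoints
theorem keys_double_insert_foldl (l : List (String × String)) (d : PySem.Dict String Int) :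
    (l.foldl (fun d p => (d.insert p.1 1).insert p.2 1) d).keys
      = PySem.Set.update d.keys (l.flatMap fun p => [p.1, p.2]) := by
  induction l generalizing d with
  | nil => simp [PySem.Set.update]
  | cons p t ih =>
    rw [List.foldl_cons, List.flatMap_cons, ih]
    simp [PySem.Set.update, keys_insert_one]

-- every member of a ≤-sorted list is bounded by its last element
theorem mem_le_getLast (res : List String) (h : res.Pairwise (· ≤ ·)) :
    ∀ a ∈ res, ∃ l, res.getLast? = some l ∧ a ≤ l := by
  induction res with
  | nil => intro a ha; cases ha
  | cons x t ih =>
    intro a ha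
    cases t with
    | nil =>
      simp only [List.mem_singleton] at ha
      exact ⟨x, rfl, le_of_eq ha⟩
    | cons y u =>
      have h' : (y :: u).Pairwise (· ≤ ·) := h.of_cons
      rcases List.mem_cons.mp ha with rfl | hmem
      · obtain ⟨l, hl, hle⟩ := ih h' y (List.mem_cons_self)
        have hxy : a ≤ y := (List.pairwise_cons.mp h).1 y (List.mem_cons_self)
        exact ⟨l, by rw [List.getLast?_cons_cons]; exact hl, le_trans hxy hle⟩
      · obtain ⟨l, hl, hle⟩ := ih h' a hmem
        exact ⟨l, by rw [List.getLast?_cons_cons]; exact hl, hle⟩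

-- invariant of B's adjacent-dedup scan
theorem dedup_scan_spec (ys : List String) :
    ∀ (res : List String), res.Pairwise (· < ·) → ys.Pairwise (· ≤ ·) →
      (∀ a ∈ res, ∀ b ∈ ys, a ≤ b) →
      ((ys.foldl (fun node_list x =>
          if node_list = [] ∨ node_list.getLast? ≠ some x then node_list ++ [x] else node_list) res).Pairwise (· < ·))
      ∧ (∀ x, x ∈ ys.foldl (fun node_list x =>
          if node_list = [] ∨ node_list.getLast? ≠ some x then node_list ++ [x] else node_list) res
            ↔ x ∈ res ∨ x ∈ ys) := by
  induction ys with
  | nil => intro res h _ _; exact ⟨h, by simp⟩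
  | cons y t ih =>
    intro res hres hys hbound
    rw [List.foldl_cons]
    by_cases hg : res = [] ∨ res.getLast? ≠ some y
    · rw [if_pos hg]
      have hlt : ∀ a ∈ res, a < y := by
        intro a ha
        rcases hg with hnil | hne
        · subst hnil; cases ha
        · have hle : a ≤ y := hbound a ha y List.mem_cons_self
          rcases lt_or_eq_of_le hle with h1 | rfl
          · exact h1
          · obtain ⟨l, hl, hyl⟩ := mem_le_getLast res (hres.imp le_of_lt) a ha
            have hlres : l ∈ res := List.mem_of_getLast? hl
            have hly : l ≤ a := hbound l hlres a List.mem_cons_self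
            exact absurd (hl.trans (by rw [le_antisymm hly hyl])) hne
      have hres' : (res ++ [y]).Pairwise (· < ·) := by
        rw [List.pairwise_append]
        exact ⟨hres, List.pairwise_singleton _ _, fun a ha b hb => by
          rw [List.mem_singleton.mp hb]; exact hlt a ha⟩
      have hbound' : ∀ a ∈ res ++ [y], ∀ b ∈ t, a ≤ b := by
        intro a ha b hb
        rcases List.mem_append.mp ha with ha | ha
        · exact hbound a ha b (List.mem_cons_of_mem _ hb)
        · rw [List.mem_singleton.mp ha]
          exact (List.pairwise_cons.mp hys).1 b hb
      obtain ⟨P, M⟩ := ih (res ++ [y]) hres' hys.of_cons hbound'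
      refine ⟨P, fun x => ?_⟩
      rw [M]
      simp only [List.mem_append, List.mem_cons]
      tauto
    · rw [if_neg hg]
      push Not at hg
      have hyres : y ∈ res := List.mem_of_getLast? hg.2
      have hbound' : ∀ a ∈ res, ∀ b ∈ t, a ≤ b :=
        fun a ha b hb => hbound a ha b (List.mem_cons_of_mem _ hb)
      obtain ⟨P, M⟩ := ih res hres hys.of_cons hbound'
      refine ⟨P, fun x => ?_⟩
      rw [M]
      simp only [List.mem_cons]
      constructor
      · tauto
      · rintro (hx | rfl | hx) <;> [exact Or.inl hx; exact Or.inl hyres; exact Or.inr hx]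

-- ===== VERDICT (by name: the statement is the Claim_ definition above) =====
theorem node_list_gen_spec : Claim_equal_node_list_gen := by
  intro data data1 _
  unfold Spec_node_list_gen node_list_gen node_list_gen_alt
  have hrange : ∀ (xs : List (String × String)) (d : PySem.Dict String Int),
      (PySem.List.pyRange 0 (xs.length : Int) 1).foldl
        (fun d i =>
          (d.insert (PySem.List.pyGetD xs i ("", "")).1 1).insert (PySem.List.pyGetD xs i ("", "")).2 1) d
      = xs.foldl (fun d p => (d.insert p.1 1).insert p.2 1) d := by
    intro xs d
    have := PySem.List.foldl_pyRange_pyGetD' (xs := xs)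
      (f := fun d p => (d.insert p.1 1).insert p.2 1) (d := ("", "")) (init := d) (a := 0) (le_refl 0)
    simpa using this
  simp only [hrange, PySem.List.foldl_append_eq_flatMap, List.nil_append,
      keys_double_insert_foldl, PySem.Dict.keys_empty]
  have hset : PySem.Set.update (PySem.Set.update ([] : List String)
        (data.flatMap fun p => [p.1, p.2])) (data1.flatMap fun p => [p.1, p.2])
      = PySem.Set.ofList ((data.flatMap fun p => [p.1, p.2]) ++ (data1.flatMap fun p => [p.1, p.2])) := by
    simp [PySem.Set.update, PySem.Set.ofList_eq_foldl, List.foldl_append]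
  rw [hset]
  set flat := (data.flatMap fun p => [p.1, p.2]) ++ (data1.flatMap fun p => [p.1, p.2]) with hflat
  rw [show (List.flatMap (fun x => [x]) (PySem.Set.ofList flat)) = PySem.Set.ofList flat by
    simp]
  -- B's scan, characterised by the invariant
  obtain ⟨P, M⟩ := dedup_scan_spec (PySem.List.sorted flat (fun x => x) false) []
    (List.Pairwise.nil) (PySem.List.sorted_pairwise flat (fun x => x)) (by intro a ha; cases ha)
  refine PySem.List.sorted_eq_of_perm_of_pairwise_lt _ _ _ ?_ P
  have hnodupB : (((PySem.List.sorted flat (fun x => x) false)).foldl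
      (fun node_list x =>
        if node_list = [] ∨ node_list.getLast? ≠ some x then node_list ++ [x] else node_list) []).Nodup :=
    P.imp ne_of_lt
  rw [List.perm_ext_iff_of_nodup hnodupB (PySem.Set.nodup_ofList flat)]
  intro x
  rw [M x, PySem.Set.mem_ofList, PySem.List.mem_sorted]
  simp
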